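-- pv_equiv track=rewrite | github.com/Lee-sungheon/TIL | coding_test/test/210611_03.py | bitwiseEquations
-- ===== SOURCE A (Python) =====
-- def bitwiseEquations(a, b):
--     result = []
--     for i in range(len(a)):
--         if a[i] < b[i]:
--             result.append(0)
--         else:
--             dif = a[i] - b[i]
--             tmp = []
--             tot = 0
--             for j in range(51, -1, -1):
--                 if b[i] & (1 << j):
--                     tmp.append(b[i] & (1 << j))
--                 elif dif >= (1 << j) * 2:
--                     dif -= (1 << j) * 2
--                     tot += 1 << j
--             if dif == 0:
--                 result.append((a[i]-sum(tmp)-tot)*2 + (sum(tmp)+tot)*3)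
--             else:
--                 result.append(0)
--     return result
-- ===== SOURCE B (Python) =====
-- def bitwiseEquations(a, b):
--     # Closed-form per element: instead of the 52-step greedy bit loop, test directly
--     # whether (a[i]-b[i])/2 is an integer whose bits avoid b[i]'s low 52 bits.
--     mask = (1 << 52) - 1
--     out = []
--     for x, y in zip(a, b):
--         if x < y:
--             out.append(0)
--             continue
--         bm = y & mask
--         dif = x - y
--         u = dif // 2
--         if dif % 2 == 0 and u < (1 << 52) and u & bm == 0:
--             out.append((x - bm - u) * 2 + (bm + u) * 3)
--         else:
--             out.append(0)
--     return out
-- ===== Notes on version B (the rewrite author's own statement) =====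
-- stated objective: faster
-- what changed: A decides each element with a 52-iteration greedy bit loop that peels powers of two off a[i]-b[i]; B replaces that loop by a closed-form test (dif even, dif//2 < 2**52 and dif//2 bit-disjoint from b[i]'s low 52 bits) and computes the result directly from b[i]&((1<<52)-1) and dif//2.
import Mathlib
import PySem

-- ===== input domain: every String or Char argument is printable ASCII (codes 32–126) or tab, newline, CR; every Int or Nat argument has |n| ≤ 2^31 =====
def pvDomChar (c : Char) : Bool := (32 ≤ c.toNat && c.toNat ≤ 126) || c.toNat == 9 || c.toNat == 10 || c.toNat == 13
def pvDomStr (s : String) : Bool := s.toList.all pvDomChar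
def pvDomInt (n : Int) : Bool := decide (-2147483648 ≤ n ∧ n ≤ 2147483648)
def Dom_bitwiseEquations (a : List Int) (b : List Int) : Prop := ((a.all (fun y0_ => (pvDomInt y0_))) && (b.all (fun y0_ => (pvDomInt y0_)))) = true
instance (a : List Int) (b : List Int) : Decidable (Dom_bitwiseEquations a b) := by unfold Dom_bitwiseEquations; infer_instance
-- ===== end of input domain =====

-- B replaces A's per-element 52-step greedy bit loop by a closed-form parity/bit-disjointness test (objective: simpler).

-- ===== PORT A =====
-- body of A's inner loop 'for j in range(51, -1, -1)'; state s = (dif, tmp, tot)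
def innerA (bi : Int) (s : Int × List Int × Int) (j : Int) : Int × List Int × Int :=
  if PySem.Int.band bi ((1 : Int) <<< j.toNat) ≠ 0 then
    (s.1, s.2.1 ++ [PySem.Int.band bi ((1 : Int) <<< j.toNat)], s.2.2)
  else if s.1 ≥ ((1 : Int) <<< j.toNat) * 2 then
    (s.1 - ((1 : Int) <<< j.toNat) * 2, s.2.1, s.2.2 + ((1 : Int) <<< j.toNat))
  else s

-- A's loop body for one index i (each branch appends one value to result)
def elemA (ai bi : Int) : Int :=
  if ai < bi then 0
  else
    let s := (PySem.List.pyRange 51 (-1) (-1)).foldl (innerA bi) (ai - bi, ([] : List Int), 0)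
    if s.1 = 0 then (ai - s.2.1.sum - s.2.2) * 2 + (s.2.1.sum + s.2.2) * 3 else 0

def bitwiseEquations (a : List Int) (b : List Int) : List Int :=
  (PySem.List.pyRange 0 (PySem.List.len a) 1).foldl
    (fun result i => result ++ [elemA (PySem.List.pyGetD a i 0) (PySem.List.pyGetD b i 0)]) []

-- ===== PORT B =====
-- closed-form per-element test of Source B
def elemB (x y : Int) : Int :=
  if x < y then 0
  else
    let mask := ((1 : Int) <<< 52) - 1
    let bm := PySem.Int.band y mask
    let dif := x - y
    let u := PySem.Int.floordiv dif 2
    if PySem.Int.mod dif 2 = 0 ∧ u < (1 : Int) <<< 52 ∧ PySem.Int.band u bm = 0 then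
      (x - bm - u) * 2 + (bm + u) * 3
    else 0

def bitwiseEquations_alt (a : List Int) (b : List Int) : List Int :=
  (a.zip b).map (fun p => elemB p.1 p.2)

-- ===== PRECONDITION & SPEC =====
-- Pre_ excludes only inputs on which A raises: if b is shorter than a, b[i] raises IndexError.
def Pre_bitwiseEquations (a : List Int) (b : List Int) : Prop := a.length ≤ b.length
instance (a : List Int) (b : List Int) : Decidable (Pre_bitwiseEquations a b) := by unfold Pre_bitwiseEquations; infer_instance
def pvWitness_bitwiseEquations : List Int × List Int := ([5, 2, 7], [2, 9, -1])

def Spec_bitwiseEquations (a : List Int) (b : List Int) (out : List Int) : Prop := out = bitwiseEquations_alt a b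
instance (a : List Int) (b : List Int) (out : List Int) : Decidable (Spec_bitwiseEquations a b out) := by unfold Spec_bitwiseEquations; infer_instance

-- ===== CLAIM (what is proved, stated in full; the proofs are below) =====
def Claim_equal_bitwiseEquations : Prop := ∀ (a : List Int) (b : List Int), Dom_bitwiseEquations a b → Pre_bitwiseEquations a b → Spec_bitwiseEquations a b (bitwiseEquations a b)

-- ===== LEMMAS AND PROOFS =====

theorem natCast_div_mod_two (m k : Nat) : ((m / 2 ^ k % 2 : Nat) : Int) = (m : Int) / 2 ^ k % 2 := by
  rw [Int.natCast_emod, Int.natCast_ediv]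
  push_cast
  ring_nf

theorem neg_div_mod_two (m : Nat) (k : Nat) :
    (-((m : Int) + 1)) / 2 ^ k % 2 = 1 - (m : Int) / 2 ^ k % 2 := by
  have hp : (0 : Int) < 2 ^ k := by positivity
  set q := (m : Int) / 2 ^ k with hq
  set r := (m : Int) % 2 ^ k with hr
  have h1 : (m : Int) = 2 ^ k * q + r := (Int.ediv_add_emod _ _).symm
  have hr1 : 0 ≤ r := Int.emod_nonneg _ (ne_of_gt hp)
  have hr2 : r < 2 ^ k := Int.emod_lt_of_pos _ hp
  have hdiv : (-((m : Int) + 1)) / 2 ^ k = -q - 1 := by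
    have h2 : (-((m : Int) + 1)) = (2 ^ k - r - 1) + (-q - 1) * 2 ^ k := by
      rw [h1]; ring
    rw [h2, Int.add_mul_ediv_right _ _ (ne_of_gt hp),
      Int.ediv_eq_zero_of_lt (by omega) (by omega)]
    omega
  rw [hdiv]; omega

theorem band_two_pow (y : Int) (n : Nat) :
    PySem.Int.band y (2 ^ n) = (y / 2 ^ n % 2) * 2 ^ n := by
  have hp : (0 : Int) < 2 ^ n := by positivity
  have hN : ((2 ^ n : Nat) : Int) = 2 ^ n := by push_cast; ring
  rcases le_or_gt 0 y with hy | hy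
  · have hyy : ((y.toNat : Nat) : Int) = y := Int.toNat_of_nonneg hy
    calc PySem.Int.band y (2 ^ n) = PySem.Int.band (y.toNat : Int) ((2 ^ n : Nat) : Int) := by
          rw [hyy, hN]
      _ = ((y.toNat &&& 2 ^ n : Nat) : Int) := PySem.Int.band_natCast _ _
      _ = (((y.toNat.testBit n).toNat * 2 ^ n : Nat) : Int) := by rw [Nat.and_two_pow]
      _ = (y / 2 ^ n % 2) * 2 ^ n := by
          rw [Nat.testBit_eq_decide_div_mod_eq]
          by_cases hb : y.toNat / 2 ^ n % 2 = 1
          · have : (y : Int) / 2 ^ n % 2 = 1 := by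
              rw [← hyy, ← natCast_div_mod_two, hb]; norm_num
            simp [hb, this, hN]
          · have h0 : y.toNat / 2 ^ n % 2 = 0 := by omega
            have : (y : Int) / 2 ^ n % 2 = 0 := by
              rw [← hyy, ← natCast_div_mod_two, h0]; norm_num
            simp [hb, this]
  · set m := (-y - 1).toNat with hm
    have hmy : ((m : Nat) : Int) = -y - 1 := Int.toNat_of_nonneg (by omega)
    have hyeq : y = -((m : Int) + 1) := by omega
    rw [PySem.Int.band]
    rw [if_neg (by omega), if_pos (le_of_lt hp)]
    have hN2 : ((2 : Int) ^ n).toNat = 2 ^ n := by rw [← hN, Int.toNat_natCast]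
    rw [hN2, Nat.land_comm, Nat.and_two_pow]
    rw [hyeq, neg_div_mod_two]
    by_cases hb : m.testBit n
    · have h1 : (m : Int) / 2 ^ n % 2 = 1 := by
        rw [Nat.testBit_eq_decide_div_mod_eq] at hb
        rw [← natCast_div_mod_two]
        simp at hb
        rw [hb]; norm_num
      simp [hb, h1]
    · have h1 : (m : Int) / 2 ^ n % 2 = 0 := by
        rw [Nat.testBit_eq_decide_div_mod_eq] at hb
        rw [← natCast_div_mod_two]
        simp at hb
        rw [hb]; norm_num
      have : (2 : Nat) ^ n - Bool.toNat false * 2 ^ n = 2 ^ n := by simp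
      simp [hb, h1, hN]

theorem band_mask (y : Int) (k : Nat) :
    PySem.Int.band y (2 ^ k - 1) = y % 2 ^ k := by
  have hp : (0 : Int) < 2 ^ k := by positivity
  have h1n : (1 : Nat) ≤ 2 ^ k := Nat.one_le_two_pow
  have hN : ((2 ^ k - 1 : Nat) : Int) = 2 ^ k - 1 := by
    push_cast [Nat.cast_sub h1n]; ring
  rcases le_or_gt 0 y with hy | hy
  · have hyy : ((y.toNat : Nat) : Int) = y := Int.toNat_of_nonneg hy
    calc PySem.Int.band y (2 ^ k - 1)
        = PySem.Int.band (y.toNat : Int) ((2 ^ k - 1 : Nat) : Int) := by rw [hyy, hN]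
      _ = ((y.toNat &&& (2 ^ k - 1) : Nat) : Int) := PySem.Int.band_natCast _ _
      _ = ((y.toNat % 2 ^ k : Nat) : Int) := by rw [Nat.and_two_pow_sub_one_eq_mod]
      _ = y % 2 ^ k := by rw [Int.natCast_emod, hyy]; push_cast; ring
  · set m := (-y - 1).toNat with hm
    have hmy : ((m : Nat) : Int) = -y - 1 := Int.toNat_of_nonneg (by omega)
    rw [PySem.Int.band]
    rw [if_neg (by omega), if_pos (by omega)]
    have hN2 : ((2 : Int) ^ k - 1).toNat = 2 ^ k - 1 := by rw [← hN, Int.toNat_natCast]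
    rw [hN2, Nat.land_comm, Nat.and_two_pow_sub_one_eq_mod]
    -- goal : ↑(2 ^ k - 1 - m % 2 ^ k) = y % 2 ^ k
    have hmod : m % 2 ^ k < 2 ^ k := Nat.mod_lt _ (by positivity)
    have hcast : ((2 ^ k - 1 - m % 2 ^ k : Nat) : Int) = 2 ^ k - 1 - ((m % 2 ^ k : Nat) : Int) := by
      push_cast [Nat.cast_sub (by omega : m % 2 ^ k ≤ 2 ^ k - 1), Nat.cast_sub h1n]
      ring
    rw [hcast]
    -- y % 2^k = 2^k - 1 - (m % 2^k)
    have hrm : ((m % 2 ^ k : Nat) : Int) = (m : Int) % 2 ^ k := by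
      rw [Int.natCast_emod]; push_cast; ring
    have hyeq : y = -((m : Int) + 1) := by omega
    rw [hyeq, hrm]
    set Q := (m : Int) / 2 ^ k with hQ
    set R := (m : Int) % 2 ^ k with hR
    have hq : (m : Int) = 2 ^ k * Q + R := (Int.ediv_add_emod _ _).symm
    have hr1 : 0 ≤ R := Int.emod_nonneg _ (ne_of_gt hp)
    have hr2 : R < 2 ^ k := Int.emod_lt_of_pos _ hp
    have h2 : (-((m : Int) + 1)) = (2 ^ k - 1 - R) - 2 ^ k * (Q + 1) := by
      linear_combination -hq
    rw [h2, Int.sub_mul_emod_self_left]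
    exact (Int.emod_eq_of_lt (by omega) (by omega)).symm

theorem emod_pow_succ_int (y : Int) (n : Nat) :
    y % 2 ^ (n + 1) = y % 2 ^ n + (y / 2 ^ n % 2) * 2 ^ n := by
  have hp : (0 : Int) < 2 ^ n := by positivity
  set q := y / 2 ^ n with hq
  set r := y % 2 ^ n with hr
  have h1 : y = 2 ^ n * q + r := (Int.ediv_add_emod _ _).symm
  have hr1 : 0 ≤ r := Int.emod_nonneg _ (ne_of_gt hp)
  have hr2 : r < 2 ^ n := Int.emod_lt_of_pos _ hp
  have hq3 : q = 2 * (q / 2) + q % 2 := by omega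
  have key : y = (q % 2 * 2 ^ n + r) + 2 ^ (n + 1) * (q / 2) := by
    rw [pow_succ]
    calc y = 2 ^ n * q + r := h1
      _ = 2 ^ n * (2 * (q / 2) + q % 2) + r := by rw [← hq3]
      _ = (q % 2 * 2 ^ n + r) + 2 ^ n * 2 * (q / 2) := by ring
  rw [key, Int.add_mul_emod_self_left]
  have hq2 : 0 ≤ q % 2 ∧ q % 2 < 2 := ⟨Int.emod_nonneg _ (by norm_num), Int.emod_lt_of_pos _ (by norm_num)⟩
  have hb : q % 2 * 2 ^ n + r < 2 ^ (n + 1) := by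
    rw [pow_succ]
    nlinarith [hq2.1, hq2.2, hr2]
  have h0 : (0 : Int) ≤ q % 2 * 2 ^ n + r := by nlinarith [hq2.1, hr1, hp.le]
  rw [Int.emod_eq_of_lt h0 hb]; ring

theorem bit_of_emod_pow (y : Int) (j k : Nat) (h : j < k) :
    (y % 2 ^ k) / 2 ^ j % 2 = y / 2 ^ j % 2 := by
  have hp : (0 : Int) < 2 ^ j := by positivity
  have hsplit : (2 : Int) ^ k = 2 ^ (k - j) * 2 ^ j := by
    rw [← pow_add]; congr 1; omega
  have h1 : y % 2 ^ k = y - 2 ^ k * (y / 2 ^ k) := by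
    rw [Int.emod_def]
  rw [h1, hsplit]
  have h2 : y - 2 ^ (k - j) * 2 ^ j * (y / (2 ^ (k - j) * 2 ^ j)) =
      y + (-(2 ^ (k - j) * (y / (2 ^ (k - j) * 2 ^ j)))) * 2 ^ j := by ring
  rw [h2, Int.add_mul_ediv_right _ _ (ne_of_gt hp)]
  have he : (2 : Int) ^ (k - j) = 2 * 2 ^ (k - j - 1) := by
    rw [← pow_succ']; congr 1; omega
  rw [he]
  have h3 : -(2 * 2 ^ (k - j - 1) * (y / (2 * 2 ^ (k - j - 1) * 2 ^ j))) =
      -2 * (2 ^ (k - j - 1) * (y / (2 * 2 ^ (k - j - 1) * 2 ^ j))) := by ring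
  rw [h3]
  generalize (2 : Int) ^ (k - j - 1) * (y / (2 * 2 ^ (k - j - 1) * 2 ^ j)) = z
  omega

def runDown (bi : Int) : Nat → (Int × List Int × Int) → (Int × List Int × Int)
  | 0, s => s
  | n + 1, s => runDown bi n (innerA bi s (n : Int))

theorem foldl_reverse_range_eq_runDown (bi : Int) (n : Nat) :
    ∀ s, ((PySem.List.pyRange 0 (n : Int) 1).reverse).foldl (innerA bi) s = runDown bi n s := by
  induction n with
  | zero =>
    intro s
    simp [PySem.List.pyRange_one_eq_nil (by norm_num : (0:Int) ≤ 0), runDown]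
  | succ n ih =>
    intro s
    have hcast : ((n + 1 : Nat) : Int) = (n : Int) + 1 := by push_cast; ring
    rw [hcast, PySem.List.pyRange_one_succ_right (by positivity)]
    simp only [List.reverse_append, List.reverse_singleton, List.singleton_append, List.foldl_cons]
    rw [ih]
    rfl

theorem innerA_natCast (bi : Int) (s : Int × List Int × Int) (n : Nat) :
    innerA bi s (n : Int) =
      if PySem.Int.band bi (2 ^ n) ≠ 0 then
        (s.1, s.2.1 ++ [PySem.Int.band bi (2 ^ n)], s.2.2)
      else if 2 ^ (n + 1) ≤ s.1 then
        (s.1 - 2 ^ (n + 1), s.2.1, s.2.2 + 2 ^ n)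
      else s := by
  have h1 : ((1 : Int) <<< ((n : Int)).toNat) = 2 ^ n := by
    rw [Int.toNat_natCast, Int.shiftLeft_eq, one_mul]
  have h2 : ((1 : Int) <<< ((n : Int)).toNat) * 2 = 2 ^ (n + 1) := by
    rw [h1, pow_succ]
  simp only [innerA, h1, h2, ge_iff_le]
  rw [pow_succ]

def sumLow (bi : Int) (n : Nat) : Int := ((List.range n).map (fun j => PySem.Int.band bi (2 ^ j))).sum

theorem sumLow_succ (bi : Int) (n : Nat) :
    sumLow bi (n + 1) = sumLow bi n + PySem.Int.band bi (2 ^ n) := by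
  simp [sumLow, List.range_succ]

theorem runDown_sum (bi : Int) (n : Nat) :
    ∀ d tmp t, (runDown bi n (d, tmp, t)).2.1.sum = tmp.sum + sumLow bi n := by
  induction n with
  | zero => intro d tmp t; simp [runDown, sumLow]
  | succ n ih =>
    intro d tmp t
    show (runDown bi n (innerA bi (d, tmp, t) (n : Int))).2.1.sum = _
    rw [innerA_natCast]
    rw [sumLow_succ]
    by_cases hb : PySem.Int.band bi (2 ^ n) ≠ 0
    · rw [if_pos hb]
      rw [ih]
      simp; ring
    · rw [if_neg hb]
      push_neg at hb
      by_cases h2 : 2 ^ (n + 1) ≤ d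
      · rw [if_pos h2, ih, hb]; ring
      · rw [if_neg h2, ih, hb]; ring

theorem sumLow_eq_emod (bi : Int) (n : Nat) : sumLow bi n = bi % 2 ^ n := by
  induction n with
  | zero => simp [sumLow]
  | succ n ih =>
    rw [sumLow_succ, ih, band_two_pow, emod_pow_succ_int]

theorem runDown_cap (bi : Int) (n : Nat) :
    ∀ d tmp t, d - (2 ^ (n + 1) - 2) ≤ (runDown bi n (d, tmp, t)).1 := by
  induction n with
  | zero => intro d tmp t; simp [runDown]
  | succ n ih =>
    intro d tmp t
    show d - (2 ^ (n + 2) - 2) ≤ (runDown bi n (innerA bi (d, tmp, t) (n : Int))).1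
    rw [innerA_natCast]
    dsimp only
    have hpow : (2 : Int) ^ (n + 2) = 2 * 2 ^ (n + 1) := by ring
    have hp : (0 : Int) < 2 ^ (n + 1) := by positivity
    by_cases hb : PySem.Int.band bi (2 ^ n) ≠ 0
    · rw [if_pos hb]
      have := ih d (tmp ++ [PySem.Int.band bi (2 ^ n)]) t
      omega
    · rw [if_neg hb]
      by_cases h2 : 2 ^ (n + 1) ≤ d
      · rw [if_pos h2]
        have := ih (d - 2 ^ (n + 1)) tmp (t + 2 ^ n)
        omega
      · rw [if_neg h2]
        have := ih d tmp t
        omega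

theorem and_two_pow_add (v w n : Nat) (hv : v < 2 ^ n) (hw : w.testBit n = false) :
    (2 ^ n + v) &&& w = v &&& w := by
  apply Nat.eq_of_testBit_eq
  intro i
  rw [Nat.testBit_land, Nat.testBit_land]
  rcases lt_trichotomy i n with h | h | h
  · rw [Nat.testBit_two_pow_add_gt h]
  · subst h; rw [hw]; simp
  · have hni : n + 1 ≤ i := h
    have h1 : (2 ^ n + v).testBit i = false := by
      apply Nat.testBit_lt_two_pow
      calc 2 ^ n + v < 2 ^ n + 2 ^ n := by omega
        _ = 2 ^ (n + 1) := by ring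
        _ ≤ 2 ^ i := Nat.pow_le_pow_right (by norm_num) hni
    have h2 : v.testBit i = false := by
      apply Nat.testBit_lt_two_pow
      calc v < 2 ^ n := hv
        _ ≤ 2 ^ i := Nat.pow_le_pow_right (by norm_num) (by omega)
    rw [h1, h2]

theorem testBit_emod_toNat (bi : Int) (n : Nat) (h : n < 52) :
    ((bi % 2 ^ 52).toNat).testBit n = decide (bi / 2 ^ n % 2 = 1) := by
  rw [Nat.testBit_eq_decide_div_mod_eq]
  simp only [decide_eq_decide]
  have hnn : 0 ≤ bi % 2 ^ 52 := Int.emod_nonneg _ (by positivity)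
  have hcast : (((bi % 2 ^ 52).toNat / 2 ^ n % 2 : Nat) : Int) = (bi % 2 ^ 52) / 2 ^ n % 2 := by
    rw [Int.natCast_emod, Int.natCast_ediv, Int.toNat_of_nonneg hnn]; push_cast; ring
  rw [bit_of_emod_pow _ _ _ h] at hcast
  constructor
  · intro h'; rw [← hcast, h']; norm_num
  · intro h'
    have : (((bi % 2 ^ 52).toNat / 2 ^ n % 2 : Nat) : Int) = 1 := by rw [hcast, h']
    exact_mod_cast this

theorem runDown_greedy (bi : Int) : ∀ (n : Nat), n ≤ 52 →
    ∀ d tmp t, 0 ≤ d → d < 2 ^ (n + 1) →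
      ((d % 2 = 0 ∧ (d / 2).toNat &&& (bi % 2 ^ 52).toNat = 0 →
          (runDown bi n (d, tmp, t)).1 = 0 ∧ (runDown bi n (d, tmp, t)).2.2 = t + d / 2) ∧
       (¬(d % 2 = 0 ∧ (d / 2).toNat &&& (bi % 2 ^ 52).toNat = 0) →
          (runDown bi n (d, tmp, t)).1 ≠ 0)) := by
  intro n
  induction n with
  | zero =>
    intro _ d tmp t hd0 hd2
    have hd : d = 0 ∨ d = 1 := by omega
    constructor
    · rintro ⟨he, _⟩
      have hz : d = 0 := by omega
      subst hz
      simp [runDown]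
    · intro hc
      have ho : d = 1 := by
        rcases hd with h | h
        · exact absurd ⟨by simp [h], by simp [h]⟩ hc
        · exact h
      subst ho
      simp [runDown]
  | succ n ih =>
    intro hn52 d tmp t hd0 hd2
    have hn : n ≤ 52 := by omega
    have hlt : n < 52 := by omega
    have hp : (0 : Int) < 2 ^ n := by positivity
    have hbit := testBit_emod_toNat bi n hlt
    have hb2 := band_two_pow bi n
    have hc01 : 0 ≤ bi / 2 ^ n % 2 ∧ bi / 2 ^ n % 2 < 2 :=
      ⟨Int.emod_nonneg _ (by norm_num), Int.emod_lt_of_pos _ (by norm_num)⟩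
    have hstep : runDown bi (n + 1) (d, tmp, t) = runDown bi n (innerA bi (d, tmp, t) (n : Int)) := rfl
    rw [hstep, innerA_natCast]
    dsimp only
    have hcastpow : ((2 ^ n : Nat) : Int) = 2 ^ n := by push_cast; ring
    have hu0 : 0 ≤ d / 2 := Int.ediv_nonneg hd0 (by norm_num)
    have hucast : (((d / 2).toNat : Nat) : Int) = d / 2 := Int.toNat_of_nonneg hu0
    by_cases hb : PySem.Int.band bi (2 ^ n) ≠ 0
    · rw [if_pos hb]
      have hcc : bi / 2 ^ n % 2 = 1 := by
        rcases (by omega : bi / 2 ^ n % 2 = 0 ∨ bi / 2 ^ n % 2 = 1) with h | h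
        · exact absurd (by rw [hb2, h, zero_mul]) hb
        · exact h
      have hbvbit : ((bi % 2 ^ 52).toNat).testBit n = true := by
        rw [hbit]; simp [hcc]
      by_cases hd : d < 2 ^ (n + 1)
      · exact ih hn d (tmp ++ [PySem.Int.band bi (2 ^ n)]) t hd0 hd
      · push_neg at hd
        have hcondfalse : ¬(d % 2 = 0 ∧ (d / 2).toNat &&& (bi % 2 ^ 52).toNat = 0) := by
          rintro ⟨hpar, hland⟩
          have hu1 : 2 ^ n ≤ d / 2 := by
            have h1 : 2 ^ n * 2 ≤ d := by rw [← pow_succ]; exact hd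
            omega
          have hu2 : d / 2 < 2 ^ n * 2 := by
            have h1 : d < 2 ^ n * 2 * 2 := by
              have := hd2; rw [pow_succ, pow_succ] at this; omega
            omega
          have hun1 : 2 ^ n ≤ (d / 2).toNat := by
            rw [← Nat.cast_le (α := Int), hucast, hcastpow]; exact hu1
          have hun2 : (d / 2).toNat < 2 ^ n * 2 := by
            rw [← Nat.cast_lt (α := Int), hucast]; push_cast; omega
          have hdivtb : ((d / 2).toNat).testBit n = true := by
            rw [Nat.testBit_eq_decide_div_mod_eq]
            have h1 : (d / 2).toNat / 2 ^ n = 1 := by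
              apply Nat.div_eq_of_lt_le <;> omega
            simp [h1]
          have htb : ((d / 2).toNat &&& (bi % 2 ^ 52).toNat).testBit n = true := by
            rw [Nat.testBit_land, hdivtb, hbvbit]; rfl
          rw [hland, Nat.zero_testBit] at htb
          exact Bool.false_ne_true htb
        refine ⟨fun hc => absurd hc hcondfalse, fun _ => ?_⟩
        have hcap := runDown_cap bi n d (tmp ++ [PySem.Int.band bi (2 ^ n)]) t
        omega
    · rw [if_neg hb]
      push_neg at hb
      have hcc : bi / 2 ^ n % 2 = 0 := by
        rcases (by omega : bi / 2 ^ n % 2 = 0 ∨ bi / 2 ^ n % 2 = 1) with h | h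
        · exact h
        · exfalso; rw [hb2, h, one_mul] at hb; omega
      have hbvbit : ((bi % 2 ^ 52).toNat).testBit n = false := by
        rw [hbit]; simp [hcc]
      by_cases h2 : 2 ^ (n + 1) ≤ d
      · rw [if_pos h2]
        set d' := d - 2 ^ (n + 1) with hd'
        have hd'0 : 0 ≤ d' := by omega
        have hd'2 : d' < 2 ^ (n + 1) := by
          have h1 : d < 2 ^ (n + 1) * 2 := by rw [← pow_succ]; exact hd2
          omega
        have hdiv : d' / 2 = d / 2 - 2 ^ n := by
          have h1 : d' = d + (-(2 ^ n)) * 2 := by rw [hd', pow_succ]; ring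
          rw [h1, Int.add_mul_ediv_right _ _ (by norm_num : (2:Int) ≠ 0)]
          ring
        have hu'0 : 0 ≤ d' / 2 := Int.ediv_nonneg hd'0 (by norm_num)
        have hu'cast : (((d' / 2).toNat : Nat) : Int) = d' / 2 := Int.toNat_of_nonneg hu'0
        have hu'lt : d' / 2 < 2 ^ n := by
          have h1 : d' < 2 ^ n * 2 := by rw [← pow_succ]; exact hd'2
          omega
        have hv : (d' / 2).toNat < 2 ^ n := by
          rw [← Nat.cast_lt (α := Int), hu'cast, hcastpow]; exact hu'lt
        have hnatsplit : (d / 2).toNat = 2 ^ n + (d' / 2).toNat := by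
          rw [← Nat.cast_inj (R := Int), hucast]
          push_cast [hu'cast]
          omega
        have hland : (d / 2).toNat &&& (bi % 2 ^ 52).toNat = (d' / 2).toNat &&& (bi % 2 ^ 52).toNat := by
          rw [hnatsplit]
          exact and_two_pow_add _ _ _ hv hbvbit
        have hpar : d' % 2 = d % 2 := by
          have h1 : d' = d - 2 ^ n * 2 := by rw [hd', pow_succ]
          omega
        have hih := ih hn d' tmp (t + 2 ^ n) hd'0 hd'2
        constructor
        · rintro ⟨hpd, hld⟩
          have hres := hih.1 ⟨by omega, by rw [← hland]; exact hld⟩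
          refine ⟨hres.1, ?_⟩
          rw [hres.2, hdiv]; ring
        · intro hc
          apply hih.2
          rintro ⟨hpd, hld⟩
          exact hc ⟨by omega, by rw [hland]; exact hld⟩
      · rw [if_neg h2]
        push_neg at h2
        exact ih hn d tmp t hd0 h2

theorem elemA_eq_elemB (x y : Int)
    (hx1 : -2147483648 ≤ x) (hx2 : x ≤ 2147483648)
    (hy1 : -2147483648 ≤ y) (hy2 : y ≤ 2147483648) :
    elemA x y = elemB x y := by
  unfold elemA elemB
  by_cases hlt : x < y
  · rw [if_pos hlt, if_pos hlt]
  · rw [if_neg hlt, if_neg hlt]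
    push_neg at hlt
    have hd0 : (0 : Int) ≤ x - y := by omega
    have hd2 : x - y < 2 ^ (52 + 1) := by norm_num; omega
    have hrange : PySem.List.pyRange 51 (-1) (-1) = (PySem.List.pyRange 0 ((52 : Nat) : Int) 1).reverse := by
      rw [PySem.List.pyRange_neg_one_eq_reverse]; norm_num
    rw [hrange, foldl_reverse_range_eq_runDown]
    have hgre := runDown_greedy y 52 le_rfl (x - y) [] 0 hd0 hd2
    have hsum := runDown_sum y 52 (x - y) [] 0
    rw [sumLow_eq_emod] at hsum
    have hsl : ((1 : Int) <<< 52) = 4503599627370496 := by decide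
    have hmask : ((1 : Int) <<< 52) - 1 = 2 ^ 52 - 1 := by rw [hsl]; norm_num
    have hbm : PySem.Int.band y (((1 : Int) <<< 52) - 1) = y % 2 ^ 52 := by rw [hmask, band_mask]
    have hmod : PySem.Int.mod (x - y) 2 = (x - y) % 2 := by
      unfold PySem.Int.mod; exact Int.fmod_eq_emod_of_nonneg _ (by norm_num)
    have hfd : PySem.Int.floordiv (x - y) 2 = (x - y) / 2 := by
      unfold PySem.Int.floordiv; exact Int.fdiv_eq_ediv_of_nonneg _ (by norm_num)
    have hu0 : (0 : Int) ≤ (x - y) / 2 := Int.ediv_nonneg hd0 (by norm_num)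
    have hbm0 : (0 : Int) ≤ y % 2 ^ 52 := Int.emod_nonneg _ (by positivity)
    have hu52 : (x - y) / 2 < (1 : Int) <<< 52 := by
      have h1 : (x - y) / 2 ≤ (x - y) := Int.ediv_le_self _ hd0
      rw [hsl]
      omega
    have hbu : PySem.Int.band ((x - y) / 2) (y % 2 ^ 52) =
        ((((x - y) / 2).toNat &&& (y % 2 ^ 52).toNat : Nat) : Int) :=
      PySem.Int.band_of_nonneg hu0 hbm0
    by_cases hcond : (x - y) % 2 = 0 ∧ ((x - y) / 2).toNat &&& (y % 2 ^ 52).toNat = 0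
    · rw [if_pos (hgre.1 hcond).1, if_pos ?side]
      case side =>
        refine ⟨by rw [hmod]; exact hcond.1, by rw [hfd]; exact hu52, ?_⟩
        rw [hfd, hbm, hbu, hcond.2]
        norm_num
      rw [hsum, (hgre.1 hcond).2, hbm, hfd]
      simp only [List.sum_nil]
      ring
    · rw [if_neg (hgre.2 hcond), if_neg ?bside]
      case bside =>
        rintro ⟨hp1, _, hp3⟩
        apply hcond
        refine ⟨by rw [← hmod]; exact hp1, ?_⟩
        rw [hfd, hbm, hbu] at hp3
        exact_mod_cast hp3

theorem final_eq : ∀ a b, Dom_bitwiseEquations a b → a.length ≤ b.length →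
    bitwiseEquations a b = bitwiseEquations_alt a b := by
  intro a b hdom hpre
  simp only [Dom_bitwiseEquations, Bool.and_eq_true, List.all_eq_true, pvDomInt,
    decide_eq_true_eq] at hdom
  unfold bitwiseEquations bitwiseEquations_alt
  rw [PySem.List.foldl_append_singleton_eq_map]
  simp only [List.nil_append]
  have hlen : (PySem.List.pyRange 0 (PySem.List.len a) 1).length = a.length := by
    simp [PySem.List.length_pyRange_one, PySem.List.len_eq]
  apply List.ext_getElem
  · simp only [List.length_map, hlen, List.length_zip]
    omega
  · intro k h1 h2
    rw [List.getElem_map, List.getElem_map, PySem.List.getElem_pyRange_one]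
    have hk : k < a.length := by
      simpa [hlen] using (by simpa using h1 : k < (PySem.List.pyRange 0 (PySem.List.len a) 1).length)
    have hkb : k < b.length := lt_of_lt_of_le hk hpre
    rw [List.getElem_zip]
    simp only [zero_add]
    rw [PySem.List.pyGetD_natCast, PySem.List.pyGetD_natCast]
    rw [List.getD_eq_getElem _ _ hk, List.getD_eq_getElem _ _ hkb]
    have ha := hdom.1 _ (List.getElem_mem hk)
    have hb := hdom.2 _ (List.getElem_mem hkb)
    exact elemA_eq_elemB _ _ ha.1 ha.2 hb.1 hb.2

-- ===== VERDICT (by name: the statement is the Claim_ definition above) =====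
theorem bitwiseEquations_spec : Claim_equal_bitwiseEquations := by
  intro a b hdom hpre
  unfold Spec_bitwiseEquations
  exact final_eq a b hdom hpre
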